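-- pv_equiv track=rewrite | github.com/wizard-taras/Codewars-solutions | Simple Fun #170_Sum Groups.py | sum_groups
-- ===== SOURCE A (Python) =====
-- def evenodd(num):
--     if num%2 == 0: return 'even'
--     if num%2 == 1: return 'odd'
--
-- def sum_groups(arr):
--     len_in = 0
--     len_out = len(arr) - 2
--     i = 0
--     flag = True
--     i_decr = 0
--     s = 0
--     temp_arr = []
--
--     while len_in != len_out:
--         len_in = len(arr)
--         while i <= len(arr)-2:
--             temp_arr.append(arr[i])
--             while flag == True:
--                 if evenodd(arr[i+1]) == evenodd(arr[i]):
--                     temp_arr.append(arr[i+1])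
--                     i_decr += 1
--                     i += 1
--                     if i == len(arr)-1:
--                         s = sum(temp_arr)
--                         i -= i_decr
--                         arr.insert(i, s)
--                         arr[(i+1):(i+2)+i_decr] = []
--
--                         break
--                 else:
--                     flag = False
--                     s = sum(temp_arr)
--                     i -= i_decr
--                     arr.insert(i, s)
--                     arr[(i+1):(i+2)+i_decr] = []
--             temp_arr.clear()
--             s = 0
--             i_decr = 0
--             i += 1
--             flag = True
--         i = 0
--         len_out = len(arr)
--
--     return len(arr)
-- ===== SOURCE B (Python) =====
-- def collapse(xs):
--     out = []
--     par = None
--     for x in xs: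
--         if out and x % 2 == par:
--             out[-1] += x
--         else:
--             out.append(x)
--             par = x % 2
--     return out
--
-- def sum_groups(arr):
--     cur = list(arr)
--     nxt = collapse(cur)
--     while len(nxt) != len(cur):
--         cur, nxt = nxt, collapse(nxt)
--     return len(cur)
-- ===== Notes on version B (the rewrite author's own statement) =====
-- stated objective: faster
-- what changed: A repeatedly rewrites the list in place with insert and slice-deletion while juggling indices (i, i_decr, flag); B is a functional fixed-point iteration of a single-pass run-collapse (sum each maximal same-parity run), with no per-merge list surgery.
-- intended difference: On two-element arrays whose elements have the same parity, A returns 2 because its loop guard (len_in=0 equals len_out=len(arr)-2=0) is never entered, while B returns 1 (the pair merges into its sum), which is the intended result of the repeated-merge task. — e.g. on sum_groups([2, 4]): A returns 2, B returns 1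
import Mathlib
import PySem

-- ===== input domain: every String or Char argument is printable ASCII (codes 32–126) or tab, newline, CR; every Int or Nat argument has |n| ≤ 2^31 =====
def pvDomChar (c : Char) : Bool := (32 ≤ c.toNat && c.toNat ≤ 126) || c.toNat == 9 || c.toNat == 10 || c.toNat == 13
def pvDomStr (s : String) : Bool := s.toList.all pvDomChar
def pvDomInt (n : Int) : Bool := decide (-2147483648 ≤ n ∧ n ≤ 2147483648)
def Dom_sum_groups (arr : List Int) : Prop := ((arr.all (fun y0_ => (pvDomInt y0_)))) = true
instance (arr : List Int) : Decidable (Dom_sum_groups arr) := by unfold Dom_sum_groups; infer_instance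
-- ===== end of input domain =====

-- B replaces A's in-place insert/slice-delete merge loops by a functional fixed-point iteration of a
-- single-pass run-collapse (no per-merge list surgery). A mutates its argument in place; the
-- equivalence proved here is about the RETURN value only (B does not mutate its argument).
-- Each while-loop is ported with a structural fuel parameter as a totality guard; every call
-- supplies MORE fuel than the loop can iterate (proved by the lemmas below), so the fuel-0
-- branch is unreachable and the ports compute exactly their Python's loops.

-- ===== PORT A =====
def evenodd (num : Int) : Option String :=
  if PySem.Int.mod num 2 = 0 then some "even"
  else if PySem.Int.mod num 2 = 1 then some "odd"
  else none

-- arr[a:b] = []  (delete a slice): arr[:a] ++ arr[b:]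
def pyDelRange (xs : List Int) (a b : Int) : List Int :=
  PySem.List.slice xs none (some a) ++ PySem.List.slice xs (some b) none

-- the innermost 'while flag == True' loop of A; 'fuel' is a totality guard only (every call below
-- supplies more fuel than the loop can iterate, proved by the lemmas), the fuel-0 branch is unreachable
def innerLoopA (fuel : Nat) (arr : List Int) (i i_decr : Int) (temp : List Int) : List Int × Int :=
  match fuel with
  | 0 => (arr, i - i_decr)
  | fuel + 1 =>
    if evenodd (PySem.List.pyGetD arr (i+1) 0) = evenodd (PySem.List.pyGetD arr i 0) then
      if i + 1 = (arr.length : Int) - 1 then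
        -- s = sum(temp_arr); i -= i_decr; arr.insert(i, s); arr[(i+1):(i+2)+i_decr] = []; break
        (pyDelRange (PySem.List.insert arr ((i+1) - (i_decr+1)) ((temp ++ [PySem.List.pyGetD arr (i+1) 0]).sum))
           (((i+1) - (i_decr+1)) + 1) ((((i+1) - (i_decr+1)) + 2) + (i_decr+1)),
         (i+1) - (i_decr+1))
      else innerLoopA fuel arr (i+1) (i_decr+1) (temp ++ [PySem.List.pyGetD arr (i+1) 0])
    else
      -- flag = False branch
      (pyDelRange (PySem.List.insert arr (i - i_decr) temp.sum)
         ((i - i_decr) + 1) (((i - i_decr) + 2) + i_decr),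
       i - i_decr)

-- the middle 'while i <= len(arr)-2' loop of A (temp_arr = [arr[i]]; inner loop; i += 1)
def midLoopA (fuel : Nat) (arr : List Int) (i : Int) : List Int :=
  match fuel with
  | 0 => arr
  | fuel + 1 =>
    if i ≤ (arr.length : Int) - 2 then
      midLoopA fuel (innerLoopA (arr.length + 1) arr i 0 [PySem.List.pyGetD arr i 0]).1
               ((innerLoopA (arr.length + 1) arr i 0 [PySem.List.pyGetD arr i 0]).2 + 1)
    else arr

-- the outer 'while len_in != len_out' loop of A
def outerLoopA (fuel : Nat) (arr : List Int) (len_in len_out : Int) : List Int :=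
  match fuel with
  | 0 => arr
  | fuel + 1 =>
    if len_in ≠ len_out then
      outerLoopA fuel (midLoopA (arr.length + 1) arr 0) (arr.length : Int)
        (((midLoopA (arr.length + 1) arr 0).length : Nat) : Int)
    else arr

def sum_groups (arr : List Int) : Int :=
  ((outerLoopA (arr.length + 2) arr 0 ((arr.length : Int) - 2)).length : Int)

-- ===== PORT B =====
def collapseStep (st : List Int × Option Int) (x : Int) : List Int × Option Int :=
  if st.1 ≠ [] ∧ st.2 = some (PySem.Int.mod x 2) then
    (st.1.dropLast ++ [st.1.getLastD 0 + x], st.2)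
  else (st.1 ++ [x], some (PySem.Int.mod x 2))

def collapseB (xs : List Int) : List Int := (xs.foldl collapseStep ([], none)).1

-- the 'while len(nxt) != len(cur)' loop of B; 'fuel' is a totality guard only (unreachable: the list
-- shrinks on every guarded iteration)
def altLoopB (fuel : Nat) (cur nxt : List Int) : List Int :=
  match fuel with
  | 0 => cur
  | fuel + 1 =>
    if nxt.length ≠ cur.length then altLoopB fuel nxt (collapseB nxt) else cur

def sum_groups_alt (arr : List Int) : Int :=
  ((altLoopB (arr.length + 1) arr (collapseB arr)).length : Int)

-- ===== PRECONDITION & SPEC =====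
-- On two-element arrays whose elements have the same parity, A returns 2 (its outer loop guard
-- len_in = 0 = len(arr)-2 = len_out is already false, so no merge ever runs) while B returns 1
-- (the pair merges into its sum), which is the intended result of the repeated-merge task.
def D_sum_groups (arr : List Int) : Prop :=
  arr.length = 2 ∧ (arr.getD 0 0 - arr.getD 1 0) % 2 = 0
instance (arr : List Int) : Decidable (D_sum_groups arr) := by unfold D_sum_groups; infer_instance

def Spec_sum_groups (arr : List Int) (out : Int) : Prop :=
  ¬ D_sum_groups arr → out = sum_groups_alt arr
instance (arr : List Int) (out : Int) : Decidable (Spec_sum_groups arr out) := by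
  unfold Spec_sum_groups; infer_instance

def pvDiffWitness_sum_groups : List Int := [2, 4]
def pvDiffWitnessOut_sum_groups : Int × Int := (2, 1)

-- ===== CLAIM (what is proved, stated in full; the proofs are below) =====
def Claim_unchanged_sum_groups : Prop :=
  ∀ (arr : List Int), Dom_sum_groups arr → Spec_sum_groups arr (sum_groups arr)
def Claim_changed_sum_groups : Prop :=
  Dom_sum_groups (pvDiffWitness_sum_groups) ∧ D_sum_groups (pvDiffWitness_sum_groups) ∧
  sum_groups (pvDiffWitness_sum_groups) = pvDiffWitnessOut_sum_groups.1 ∧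
  sum_groups_alt (pvDiffWitness_sum_groups) = pvDiffWitnessOut_sum_groups.2 ∧
  pvDiffWitnessOut_sum_groups.1 ≠ pvDiffWitnessOut_sum_groups.2
def Claim_exact_sum_groups : Prop :=
  ∀ (arr : List Int), Dom_sum_groups arr → D_sum_groups arr →
    sum_groups arr ≠ sum_groups_alt arr

-- ===== LEMMAS AND PROOFS =====

-- run-splitting spec helper: consume the longest prefix with parity p, return (its sum, rest)
def runSplit (p : Int) : List Int → Int × List Int
  | [] => (0, [])
  | x :: xs => if PySem.Int.mod x 2 = p then (x + (runSplit p xs).1, (runSplit p xs).2) else (0, x :: xs)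

theorem runSplit_length (p : Int) (xs : List Int) : (runSplit p xs).2.length ≤ xs.length := by
  induction xs with
  | nil => simp [runSplit]
  | cons x xs ih =>
    rw [runSplit]
    split
    · simp; omega
    · simp

def runs : List Int → List Int
  | [] => []
  | x :: xs =>
    (x + (runSplit (PySem.Int.mod x 2) xs).1) :: runs (runSplit (PySem.Int.mod x 2) xs).2
termination_by xs => xs.length
decreasing_by
  have := runSplit_length (PySem.Int.mod x 2) xs
  simp only [List.length_cons]
  omega

theorem runs_length_le (xs : List Int) : (runs xs).length ≤ xs.length := by
  induction xs using runs.induct with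
  | case1 => simp [runs]
  | case2 x xs ih =>
    rw [runs]
    have h1 := runSplit_length (PySem.Int.mod x 2) xs
    simp only [List.length_cons]
    omega

def iterR (xs : List Int) : List Int :=
  if (runs xs).length = xs.length then xs else iterR (runs xs)
termination_by xs.length
decreasing_by
  have := runs_length_le xs
  omega

theorem evenodd_eq_iff (a b : Int) :
    (evenodd a = evenodd b) ↔ PySem.Int.mod a 2 = PySem.Int.mod b 2 := by
  have ha0 := PySem.Int.mod_nonneg a (b := 2) (by norm_num)
  have ha1 := PySem.Int.mod_lt a (b := 2) (by norm_num)
  have hb0 := PySem.Int.mod_nonneg b (b := 2) (by norm_num)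
  have hb1 := PySem.Int.mod_lt b (b := 2) (by norm_num)
  have ha : PySem.Int.mod a 2 = 0 ∨ PySem.Int.mod a 2 = 1 := by omega
  have hb : PySem.Int.mod b 2 = 0 ∨ PySem.Int.mod b 2 = 1 := by omega
  rcases ha with ha | ha <;> rcases hb with hb | hb <;>
    simp only [evenodd, ha, hb] <;> norm_num <;> decide

theorem mergeShape (arr : List Int) (j m : Nat) (s : Int) (hj : j + m ≤ arr.length) (hm : 1 ≤ m) :
    pyDelRange (PySem.List.insert arr (j : Int) s) ((j : Int) + 1) ((j : Int) + 1 + (m : Int))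
      = arr.take j ++ s :: arr.drop (j + m) := by
  rw [PySem.List.insert_natCast arr j s (by omega)]
  unfold pyDelRange
  have e1 : (j : Int) + 1 = ((j + 1 : Nat) : Int) := by push_cast; ring
  rw [e1]
  have e2 : ((j + 1 : Nat) : Int) + (m : Int) = ((j + 1 + m : Nat) : Int) := by push_cast; ring
  rw [e2, PySem.List.slice_to_natCast, PySem.List.slice_from_natCast]
  have hlen : (arr.take j).length = j := by simp; omega
  rw [List.take_append, List.drop_append, hlen]
  have ha' : j + 1 - j = 1 := by omega
  have hb' : j + 1 + m - j = m + 1 := by omega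
  rw [ha', hb']
  have g1 : List.take (j+1) (arr.take j) = arr.take j := List.take_of_length_le (by omega)
  have g2 : List.take 1 (s :: arr.drop j) = [s] := by simp
  have g3 : List.drop (j+1+m) (arr.take j) = [] := List.drop_eq_nil_of_le (by omega)
  have g4 : List.drop (m+1) (s :: arr.drop j) = arr.drop (j+m) := by
    rw [List.drop_succ_cons, List.drop_drop]
  rw [g1, g2, g3, g4]
  simp

theorem innerLoopA_spec (arr : List Int) : ∀ (fuel : Nat) (i d : Nat) (temp : List Int),
    d ≤ i → i + 1 < arr.length → arr.length - i ≤ fuel →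
    innerLoopA fuel arr (i : Int) (d : Int) temp =
      (arr.take (i - d) ++
         (temp.sum + (runSplit (PySem.Int.mod (arr.getD i 0) 2) (arr.drop (i+1))).1)
         :: (runSplit (PySem.Int.mod (arr.getD i 0) 2) (arr.drop (i+1))).2,
       ((i : Int) - (d : Int))) := by
  intro fuel
  induction fuel with
  | zero => intro i d temp hd hi hf; omega
  | succ fuel ih =>
    intro i d temp hd hi hf
    rw [innerLoopA]
    have ec1 : (i : Int) + 1 = ((i + 1 : Nat) : Int) := by push_cast; ring
    rw [ec1, PySem.List.pyGetD_natCast, PySem.List.pyGetD_natCast]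
    have hgd : arr.getD (i+1) 0 = arr[i+1]'hi := List.getD_eq_getElem arr 0 hi
    have hgi : arr.getD i 0 = arr[i]'(by omega) := List.getD_eq_getElem arr 0 (by omega)
    have hdrop : arr.drop (i+1) = arr[i+1]'hi :: arr.drop (i+2) := by
      rw [List.drop_eq_getElem_cons hi]
    by_cases hpar : PySem.Int.mod (arr.getD (i+1) 0) 2 = PySem.Int.mod (arr.getD i 0) 2
    · rw [if_pos ((evenodd_eq_iff _ _).2 hpar)]
      by_cases hend : ((i + 1 : Nat) : Int) = (arr.length : Int) - 1
      · -- break branch: i+2 = arr.length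
        have hlen2 : i + 2 = arr.length := by omega
        rw [if_pos hend]
        have e3 : ((i + 1 : Nat):Int) - ((d:Int) + 1) = ((i - d : Nat) : Int) := by push_cast; omega
        have e4 : ((i - d : Nat) : Int) + 2 + ((d:Int)+1) = ((i - d : Nat) : Int) + 1 + ((d + 2 : Nat) : Int) := by push_cast; omega
        rw [e3, e4, mergeShape arr (i - d) (d + 2) _ (by omega) (by omega)]
        have hdrop2 : arr.drop (i - d + (d + 2)) = [] := by
          have : i - d + (d + 2) = arr.length := by omega
          simp [this]
        have hdrop3 : arr.drop (i + 2) = [] := by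
          have : i + 2 = arr.length := by omega
          simp [this]
        rw [Prod.mk.injEq]
        constructor
        · rw [hdrop2, hdrop, hdrop3, runSplit, if_pos (by rw [← hgd]; exact hpar)]
          simp only [runSplit, List.sum_append, List.sum_cons, List.sum_nil, add_zero, hgd]
        · push_cast; omega
      · -- continue: recursive call
        rw [if_neg hend]
        have hi2 : (i + 1) + 1 < arr.length := by omega
        have e6 : (d : Int) + 1 = ((d+1 : Nat) : Int) := by push_cast; ring
        rw [e6, ih (i+1) (d+1) _ (by omega) hi2 (by omega)]
        have hpp : PySem.Int.mod (arr.getD (i+1) 0) 2 = PySem.Int.mod (arr.getD i 0) 2 := hpar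
        rw [Prod.mk.injEq]
        constructor
        · rw [hpp]
          have e7 : i + 1 - (d + 1) = i - d := by omega
          rw [e7, hdrop, runSplit, if_pos (by rw [← hgd, hpp])]
          simp only [List.sum_append, List.sum_cons, List.sum_nil, add_zero, hgd]
          have hsum : ∀ t' : Int, temp.sum + arr[i+1]'hi + t' = temp.sum + (arr[i+1]'hi + t') := by
            intro t'; ring
          rw [hsum]
        · push_cast; omega
    · rw [if_neg (by rw [evenodd_eq_iff]; exact hpar)]
      have e8 : (i : Int) - (d : Int) = ((i - d : Nat) : Int) := by push_cast; omega
      have e9 : ((i - d : Nat) : Int) + 2 + (d : Int) = ((i - d : Nat) : Int) + 1 + ((d + 1 : Nat) : Int) := by push_cast; omega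
      rw [e8, e9, mergeShape arr (i - d) (d + 1) _ (by omega) (by omega)]
      have e10 : i - d + (d + 1) = i + 1 := by omega
      rw [e10, hdrop, runSplit, if_neg (by rw [← hgd]; exact hpar)]
      simp only [add_zero]
    termination_by arr.length - i

theorem midLoopA_runs : ∀ (fuel : Nat) (arr : List Int) (i : Nat), arr.length - i ≤ fuel →
    midLoopA fuel arr (i : Int) = arr.take i ++ runs (arr.drop i) := by
  intro fuel
  induction fuel with
  | zero =>
    intro arr i hf
    rw [midLoopA]
    have h2 : arr.length ≤ i := by omega
    rw [List.drop_eq_nil_of_le h2, List.take_of_length_le h2]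
    simp [runs]
  | succ fuel ih =>
    intro arr i hf
    rw [midLoopA]
    by_cases h : i + 2 ≤ arr.length
    · rw [if_pos (by push_cast; omega)]
      rw [show (0:Int) = ((0:Nat):Int) from rfl,
          innerLoopA_spec arr (arr.length + 1) i 0 _ (by omega) (by omega) (by omega)]
      have hsnd : (((i:Int) - ((0:Nat):Int)) + 1) = ((i+1 : Nat) : Int) := by push_cast; ring
      simp only [hsnd]
      have hr2 := runSplit_length (PySem.Int.mod (arr.getD i 0) 2) (arr.drop (i+1))
      rw [ih _ (i+1) (by
        simp only [List.length_append, List.length_cons, List.length_take, List.length_drop] at hr2 ⊢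
        omega)]
      have hi0 : i - 0 = i := by omega
      have htk : ∀ (y : Int) (l : List Int),
          (arr.take i ++ y :: l).take (i+1) = arr.take i ++ [y] := by
        intro y l
        rw [show i + 1 = (arr.take i).length + 1 from by simp; omega, List.take_append]
        simp
      have hdr : ∀ (y : Int) (l : List Int),
          (arr.take i ++ y :: l).drop (i+1) = l := by
        intro y l
        rw [show i + 1 = (arr.take i).length + 1 from by simp; omega, List.drop_append]
        simp
      rw [hi0, htk, hdr]
      rw [List.drop_eq_getElem_cons (show i < arr.length by omega), runs]
      simp [PySem.List.pyGetD_natCast, List.getD_eq_getElem?_getD,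
        List.getElem?_eq_getElem (show i < arr.length by omega)]
    · rw [if_neg (by push_cast; omega)]
      by_cases h2 : arr.length ≤ i
      · rw [List.drop_eq_nil_of_le h2, List.take_of_length_le h2]; simp [runs]
      · have hi : i < arr.length := by omega
        have hnil : arr.drop (i+1) = [] := List.drop_eq_nil_of_le (by omega)
        rw [List.drop_eq_getElem_cons hi, runs, hnil]
        simp only [runSplit, runs, add_zero]
        conv_lhs => rw [← List.take_append_drop i arr]
        rw [List.drop_eq_getElem_cons hi, hnil]

theorem runSplit_eq_of_length (p : Int) (xs : List Int)
    (h : (runSplit p xs).2.length = xs.length) : runSplit p xs = (0, xs) := by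
  cases xs with
  | nil => simp [runSplit]
  | cons x l =>
    rw [runSplit]
    split
    · exfalso
      have h1 := runSplit_length p l
      rw [runSplit] at h
      split at h
      · simp at h; omega
      · simp_all
    · rfl

theorem runs_eq_self_of_length (xs : List Int) (h : (runs xs).length = xs.length) :
    runs xs = xs := by
  induction xs using runs.induct with
  | case1 => simp [runs]
  | case2 x l ih =>
    rw [runs] at h ⊢
    simp only [List.length_cons] at h
    have h1 := runSplit_length (PySem.Int.mod x 2) l
    have h2 := runs_length_le (runSplit (PySem.Int.mod x 2) l).2
    have h3 : (runSplit (PySem.Int.mod x 2) l).2.length = l.length := by omega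
    have h4 := runSplit_eq_of_length _ _ h3
    rw [h4] at h ih ⊢
    simp only [add_zero]
    simp only at ih h
    rw [ih (by omega)]

theorem foldl_collapseStep (xs : List Int) (out : List Int) (s p : Int) :
    (xs.foldl collapseStep (out ++ [s], some p)).1
      = out ++ (s + (runSplit p xs).1) :: runs (runSplit p xs).2 := by
  induction xs generalizing out s p with
  | nil => simp [runSplit, runs]
  | cons x xs ih =>
    simp only [List.foldl_cons]
    by_cases hp : PySem.Int.mod x 2 = p
    · rw [show collapseStep (out ++ [s], some p) x = (out ++ [s + x], some p) from by
        rw [collapseStep, if_pos ⟨by simp, by rw [hp]⟩]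
        simp]
      rw [ih out (s + x) p, runSplit, if_pos hp]
      have : s + x + (runSplit p xs).1 = s + (x + (runSplit p xs).1) := by ring
      rw [this]
    · rw [show collapseStep (out ++ [s], some p) x = ((out ++ [s]) ++ [x], some (PySem.Int.mod x 2)) from by
        rw [collapseStep, if_neg (by rintro ⟨-, h2⟩; rw [Option.some.injEq] at h2; exact hp h2.symm)]]
      rw [ih (out ++ [s]) x (PySem.Int.mod x 2), runSplit, if_neg hp]
      rw [runs]
      simp

theorem collapseB_eq_runs (xs : List Int) : collapseB xs = runs xs := by
  cases xs with
  | nil => simp [collapseB, runs]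
  | cons x xs =>
    unfold collapseB
    simp only [List.foldl_cons]
    rw [show collapseStep ([], none) x = ([] ++ [x], some (PySem.Int.mod x 2)) from by
      simp [collapseStep]]
    rw [foldl_collapseStep xs [] x (PySem.Int.mod x 2), runs]
    simp

theorem altLoopB_eq_iterR : ∀ (fuel : Nat) (cur : List Int), cur.length + 1 ≤ fuel →
    altLoopB fuel cur (collapseB cur) = iterR cur := by
  intro fuel
  induction fuel with
  | zero => intro cur hf; omega
  | succ fuel ih =>
    intro cur hf
    rw [altLoopB, collapseB_eq_runs, iterR]
    by_cases h : (runs cur).length = cur.length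
    · rw [if_neg (by omega), if_pos h]
    · have hlt := runs_length_le cur
      rw [if_pos h, if_neg h, ih (runs cur) (by omega)]

theorem outerLoopA_eq_iterR : ∀ (fuel : Nat) (arr : List Int) (li lo : Int), li ≠ lo →
    arr.length + 2 ≤ fuel → outerLoopA fuel arr li lo = iterR arr := by
  intro fuel
  induction fuel with
  | zero => intro arr li lo h hf; omega
  | succ fuel ih =>
    intro arr li lo h hf
    rw [outerLoopA, if_pos h]
    have hm : midLoopA (arr.length + 1) arr 0 = runs arr := by
      have := midLoopA_runs (arr.length + 1) arr 0 (by omega)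
      simpa using this
    rw [hm, iterR]
    by_cases hl : (runs arr).length = arr.length
    · cases fuel with
      | zero => omega
      | succ f =>
        rw [if_pos hl, outerLoopA, if_neg (by simp [hl]), runs_eq_self_of_length arr hl]
    · have hlt := runs_length_le arr
      rw [if_neg hl, ih (runs arr) _ _ (by simp; omega) (by omega)]

theorem runs_single (x : Int) : runs [x] = [x] := by
  rw [runs]
  simp [runSplit, runs]

theorem runs_pair_same (a b : Int) (h : PySem.Int.mod b 2 = PySem.Int.mod a 2) :
    runs [a, b] = [a + b] := by
  rw [runs, runSplit, if_pos h]
  simp [runSplit, runs]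

theorem runs_pair_diff (a b : Int) (h : PySem.Int.mod b 2 ≠ PySem.Int.mod a 2) :
    runs [a, b] = [a, b] := by
  rw [runs, runSplit, if_neg h]
  simp [runs_single]

theorem sum_groups_len2 (a b : Int) : sum_groups [a, b] = 2 := by
  show ((outerLoopA (3+1) [a, b] 0 (((2:Nat) : Int) - 2)).length : Int) = 2
  rw [outerLoopA, if_neg (by norm_num)]
  rfl

theorem alt_len2_same (a b : Int) (h : PySem.Int.mod b 2 = PySem.Int.mod a 2) :
    sum_groups_alt [a, b] = 1 := by
  show ((altLoopB (2+1) [a, b] (collapseB [a, b])).length : Int) = 1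
  rw [collapseB_eq_runs, runs_pair_same a b h, altLoopB, if_pos (by norm_num),
      collapseB_eq_runs, runs_single, altLoopB, if_neg (by norm_num)]
  rfl

theorem mod_pair_iff (a b : Int) :
    PySem.Int.mod b 2 = PySem.Int.mod a 2 ↔ (a - b) % 2 = 0 := by
  have ha : PySem.Int.mod a 2 = a % 2 := by simp [pysem]
  have hb : PySem.Int.mod b 2 = b % 2 := by simp [pysem]
  rw [ha, hb]
  omega

theorem main_eq (arr : List Int) (hD : ¬ D_sum_groups arr) :
    sum_groups arr = sum_groups_alt arr := by
  by_cases h2 : arr.length = 2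
  · match arr, h2 with
    | [a, b], _ =>
      have hmod : ¬ (a - b) % 2 = 0 := by simpa [D_sum_groups, h2] using hD
      rw [sum_groups_len2, sum_groups_alt,
          altLoopB_eq_iterR ([a,b].length + 1) [a,b] (by simp), iterR,
          if_pos (by rw [runs_pair_diff a b (fun hc => hmod ((mod_pair_iff a b).1 hc))])]
      rfl
  · rw [sum_groups, sum_groups_alt,
        outerLoopA_eq_iterR (arr.length + 2) arr _ _ (by omega) (by omega),
        altLoopB_eq_iterR (arr.length + 1) arr (by omega)]

-- ===== VERDICT (by name: the statement is the Claim_ definition above) =====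
theorem sum_groups_spec : Claim_unchanged_sum_groups := by
  intro arr _dom hD
  exact main_eq arr hD

theorem sum_groups_changed : Claim_changed_sum_groups := by
  unfold Claim_changed_sum_groups
  refine ⟨by decide, by decide, ?_, ?_, by decide⟩
  · exact sum_groups_len2 2 4
  · exact alt_len2_same 2 4 (by decide)

theorem sum_groups_tight : Claim_exact_sum_groups := by
  unfold Claim_exact_sum_groups
  intro arr _dom hDcond
  obtain ⟨h2, hmod⟩ := hDcond
  match arr, h2 with
  | [a, b], _ =>
    rw [sum_groups_len2, alt_len2_same a b ((mod_pair_iff a b).2 (by simpa using hmod))]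
    decide
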